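-- pv_equiv track=rewrite | github.com/NickOneRG/LeetCode | LeetCode/2147.number-of-ways-to-divide-a-long-corridor.py | numberOfWays
-- ===== SOURCE A (Python) =====
-- def numberOfWays(corridor: str) -> int:
--     seats, memo, ways = 0, 0, 1
--
--     for ind, val in enumerate(corridor):
--         if val == "S":
--
--             if seats < 2: seats += 1
--             else:
--                 seats = 1
--                 ways *= (ind - memo)
--
--             memo = ind
--
--     return 0 if seats < 2 else ways % (10 ** 9 + 7)
-- ===== SOURCE B (Python) =====
-- def numberOfWays(corridor: str) -> int:
--     # Right-to-left DP over section states: d_s = number of ways to divide the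
--     # remaining suffix given s seats already placed in the current section.
--     MOD = 10 ** 9 + 7
--     d0, d1, d2 = 0, 0, 1
--     for c in reversed(corridor):
--         if c == 'S':
--             d0, d1, d2 = d1, d2, d1
--         else:
--             d2 = (d2 + d0) % MOD
--     return d0
-- ===== Notes on version B (the rewrite author's own statement) =====
-- stated objective: alternative
-- what changed: Replaces A's left-to-right greedy scan (seat counter + last-seat index, multiplying in each inter-pair gap) by the textbook right-to-left dynamic program over section states: d_s = ways to divide the remaining suffix given s seats already in the current section, updated per character with the modulus applied as it goes.
import Mathlib
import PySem

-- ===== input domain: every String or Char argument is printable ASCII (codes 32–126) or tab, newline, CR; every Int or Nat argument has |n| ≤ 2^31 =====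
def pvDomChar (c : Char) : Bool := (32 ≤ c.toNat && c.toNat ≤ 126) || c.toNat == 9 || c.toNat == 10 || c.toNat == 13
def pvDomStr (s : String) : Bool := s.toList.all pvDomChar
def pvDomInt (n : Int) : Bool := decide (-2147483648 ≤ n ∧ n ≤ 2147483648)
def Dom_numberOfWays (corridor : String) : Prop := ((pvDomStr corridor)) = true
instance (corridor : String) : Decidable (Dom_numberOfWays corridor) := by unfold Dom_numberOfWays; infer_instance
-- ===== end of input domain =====

-- B replaces A's left-to-right greedy scan (seat counter / last-seat index / running
-- gap product) by a right-to-left dynamic program over section states; objective: alternative.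

-- ===== PORT A =====
-- literal transliteration of A's fold over enumerate(corridor) with state (seats, memo, ways)
def numberOfWays (corridor : String) : Int :=
  let st :=
    (PySem.List.enumerate corridor.toList 0).foldl
      (fun (s : Int × Int × Int) p =>
        if p.2 == 'S' then
          if s.1 < 2 then (s.1 + 1, p.1, s.2.2)
          else (1, p.1, s.2.2 * (p.1 - s.2.1))
        else s)
      (0, 0, 1)
  if st.1 < 2 then 0 else PySem.Int.mod st.2.2 (10 ^ 9 + 7)

-- ===== PORT B =====
-- literal transliteration of Source B: fold over reversed(corridor) of the DP state (d0, d1, d2)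
def numberOfWays_alt (corridor : String) : Int :=
  let st :=
    (corridor.toList.reverse).foldl
      (fun (d : Int × Int × Int) c =>
        if c == 'S' then (d.2.1, d.2.2, d.2.1)
        else (d.1, d.2.1, PySem.Int.mod (d.2.2 + d.1) (10 ^ 9 + 7)))
      (0, 0, 1)
  st.1

-- ===== PRECONDITION & SPEC =====
def Spec_numberOfWays (corridor : String) (out : Int) : Prop := out = numberOfWays_alt corridor
instance (corridor : String) (out : Int) : Decidable (Spec_numberOfWays corridor out) := by unfold Spec_numberOfWays; infer_instance

-- ===== CLAIM (what is proved, stated in full; the proofs are below) =====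
def Claim_equal_numberOfWays : Prop := ∀ (corridor : String), Dom_numberOfWays corridor → Spec_numberOfWays corridor (numberOfWays corridor)

-- ===== LEMMAS AND PROOFS =====

-- A's per-character step, restricted to the seat positions only
def pvStep2 (s : Int × Int × Int) (i : Int) : Int × Int × Int :=
  if s.1 < 2 then (s.1 + 1, i, s.2.2) else (1, i, s.2.2 * (i - s.2.1))

-- product of the gaps between consecutive seat pairs; e = end seat of the previous pair
def pvProdGaps (e : Int) : List Int → Int
  | a :: b :: rest => (a - e) * pvProdGaps b rest
  | _ => 1

-- the seat positions of L, enumerated from index i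
def pvPos (L : List Char) (i : Int) : List Int :=
  ((PySem.List.enumerate L i).filter (fun p => p.2 == 'S')).map (·.1)

-- exact (un-mod-ed) values of the three DP states, as functions of the seat positions:
-- pvA2 e ps = ways with the current section complete, previous seat at index e
def pvA2 (e : Int) (ps : List Int) : Int :=
  if ps.length % 2 = 0 then pvProdGaps e ps else 0

-- pvA1 ps = ways with one seat pending in the current section
def pvA1 : List Int → Int
  | [] => 0
  | a :: rest => pvA2 a rest

-- pvA0 ps = ways with the current section empty (A's answer before the final mod)
def pvA0 : List Int → Int
  | [] => 0
  | _ :: rest => pvA1 rest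

-- non-'S' entries leave A's state unchanged: the fold filters down to seat positions
theorem pvFoldFilter (L : List (Int × Char)) (st : Int × Int × Int) :
    L.foldl
      (fun (s : Int × Int × Int) p =>
        if p.2 == 'S' then
          if s.1 < 2 then (s.1 + 1, p.1, s.2.2)
          else (1, p.1, s.2.2 * (p.1 - s.2.1))
        else s) st
    = ((L.filter (fun p => p.2 == 'S')).map (·.1)).foldl pvStep2 st := by
  induction L generalizing st with
  | nil => rfl
  | cons p L ih =>
      rw [List.foldl_cons, ih, List.filter_cons]
      by_cases h : p.2 == 'S'
      · simp only [if_pos h, List.map_cons, List.foldl_cons]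
        congr 1
      · simp only [if_neg h]

-- a completed pair advances the state (2, e, w) to (2, b, w * (a - e))
theorem pvStep2_pair (a b e w : Int) :
    pvStep2 (pvStep2 (2, e, w) a) b = (2, b, w * (a - e)) := by
  norm_num [pvStep2]

-- seat counter after a completed pair: 2 iff an even number of seats remain
theorem pvSeats : ∀ (ps : List Int) (e w : Int),
    (ps.foldl pvStep2 (2, e, w)).1 = if ps.length % 2 = 0 then 2 else 1
  | [], _, _ => rfl
  | [a], e, w => by norm_num [pvStep2]
  | a :: b :: rest, e, w => by
      have h := pvSeats rest b (w * (a - e))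
      rw [List.foldl_cons, List.foldl_cons, pvStep2_pair, h]
      simp only [List.length_cons]
      split_ifs <;> omega
  termination_by ps => ps.length

-- ways accumulated from a completed pair onwards is the product of the pair gaps
theorem pvWays : ∀ (ps : List Int) (e w : Int), ps.length % 2 = 0 →
    (ps.foldl pvStep2 (2, e, w)).2.2 = w * pvProdGaps e ps
  | [], e, w, _ => by simp [pvProdGaps]
  | [a], _, _, h => by simp at h
  | a :: b :: rest, e, w, h => by
      have h' : rest.length % 2 = 0 := by simp at h; omega
      have ih := pvWays rest b (w * (a - e)) h'
      rw [List.foldl_cons, List.foldl_cons, pvStep2_pair, ih]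
      simp only [pvProdGaps]
      ring
  termination_by ps => ps.length

-- unfolding the seat positions across a cons
theorem pvPos_cons (c : Char) (L : List Char) (i : Int) :
    pvPos (c :: L) i = if c == 'S' then i :: pvPos L (i + 1) else pvPos L (i + 1) := by
  simp only [pvPos, PySem.List.enumerate_cons, List.filter_cons]
  by_cases h : c == 'S' <;> simp [h]

-- DP plant step: a plant in front shifts the virtual previous-seat index left by one
theorem pvA2_plant (i : Int) (ps : List Int) :
    pvA2 (i - 1) ps = pvA2 i ps + pvA0 ps := by
  obtain _ | ⟨a, _ | ⟨b, rest⟩⟩ := ps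
  · simp [pvA2, pvA0, pvProdGaps]
  · simp [pvA2, pvA0, pvA1]
  · simp only [pvA2, pvA0, pvA1, List.length_cons, pvProdGaps]
    split_ifs with h1 h2
    · ring
    · exfalso; omega
    · exfalso; omega
    · ring

-- DP seat step: a seat at index i completes the pending section with gap factor 1
theorem pvA2_seat (i : Int) (ps : List Int) :
    pvA2 (i - 1) (i :: ps) = pvA1 ps := by
  obtain _ | ⟨a, rest⟩ := ps
  · simp [pvA2, pvA1]
  · simp only [pvA2, pvA1, List.length_cons, pvProdGaps]
    split_ifs with h1 h2
    · ring
    · exfalso; omega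
    · exfalso; omega
    · ring

-- B's right-to-left fold computes exactly the three DP values, each reduced mod 1e9+7
theorem pvDP (L : List Char) : ∀ (i : Int),
    (L.foldr
      (fun c (d : Int × Int × Int) =>
        if c == 'S' then (d.2.1, d.2.2, d.2.1)
        else (d.1, d.2.1, PySem.Int.mod (d.2.2 + d.1) (10 ^ 9 + 7)))
      (0, 0, 1))
    = (pvA0 (pvPos L i) % (10 ^ 9 + 7),
       pvA1 (pvPos L i) % (10 ^ 9 + 7),
       pvA2 (i - 1) (pvPos L i) % (10 ^ 9 + 7)) := by
  induction L with
  | nil =>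
      intro i
      simp [pvPos, PySem.List.enumerate_nil, pvA0, pvA1, pvA2, pvProdGaps]
  | cons c L ih =>
      intro i
      rw [List.foldr_cons, ih (i + 1), pvPos_cons]
      by_cases h : c == 'S'
      · simp only [h, if_pos]
        have e1 : pvA0 (i :: pvPos L (i + 1)) = pvA1 (pvPos L (i + 1)) := rfl
        have e2 : pvA1 (i :: pvPos L (i + 1)) = pvA2 i (pvPos L (i + 1)) := rfl
        have e3 : pvA2 (i - 1) (i :: pvPos L (i + 1)) = pvA1 (pvPos L (i + 1)) :=
          pvA2_seat i (pvPos L (i + 1))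
        have e4 : i + 1 - 1 = i := by ring
        simp only [e1, e2, e3, e4]
      · simp only [h, if_neg, Bool.false_eq_true, not_false_iff]
        have e4 : i + 1 - 1 = i := by ring
        rw [e4]
        refine Prod.ext rfl (Prod.ext rfl ?_)
        show PySem.Int.mod _ _ = _
        rw [PySem.Int.mod_eq_emod_of_pos (by norm_num)]
        rw [← Int.add_emod, ← pvA2_plant]

-- ===== VERDICT (by name: the statement is the Claim_ definition above) =====
theorem numberOfWays_spec : Claim_equal_numberOfWays := by
  intro corridor _
  unfold Spec_numberOfWays
  simp only [numberOfWays, numberOfWays_alt]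
  rw [pvFoldFilter, List.foldl_reverse]
  rw [pvDP corridor.toList 0]
  show _ = pvA0 (pvPos corridor.toList 0) % (10 ^ 9 + 7)
  rw [show ((PySem.List.enumerate corridor.toList 0).filter
      (fun p => p.2 == 'S')).map (·.1) = pvPos corridor.toList 0 from rfl]
  generalize pvPos corridor.toList 0 = ps
  obtain _ | ⟨a, _ | ⟨b, rest⟩⟩ := ps
  · norm_num [pvStep2, pvA0]
  · norm_num [pvStep2, List.foldl, pvA0, pvA1]
  · rw [List.foldl_cons, List.foldl_cons]
    have hstep : pvStep2 (pvStep2 (0, 0, 1) a) b = (2, b, 1) := by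
      norm_num [pvStep2]
    rw [hstep]
    by_cases hpar : rest.length % 2 = 0
    · have hseat := pvSeats rest b 1
      have hway := pvWays rest b 1 hpar
      rw [if_pos hpar] at hseat
      rw [if_neg (by rw [hseat]; norm_num), hway]
      rw [PySem.Int.mod_eq_emod_of_pos (by norm_num)]
      simp only [pvA0, pvA1, pvA2, hpar, if_pos]
      ring_nf
    · have hseat := pvSeats rest b 1
      rw [if_neg hpar] at hseat
      rw [if_pos (by rw [hseat]; norm_num)]
      simp only [pvA0, pvA1, pvA2, hpar]
      norm_num
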